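-- pv_equiv track=rewrite | github.com/TechGuard/advent_of_code | 2024/solutions/day19.py | find_solutions
-- ===== SOURCE A (Python) =====
-- def find_solutions(designs, patterns):
--     cache = {}
--
--     def calc_solutions(design, patterns):
--         if design == '':
--             return 1
--         total = 0
--         for pattern in patterns:
--             if design.endswith(pattern):
--                 remainder = design[:-len(pattern)]
--                 if remainder in cache:
--                     result = cache[remainder]
--                 else:
--                     result = calc_solutions(remainder, patterns)
--                     cache[remainder] = result
--                 total += result
--         return total
--
--     return [calc_solutions(design, patterns) for design in designs]
-- ===== SOURCE B (Python) =====
-- def find_solutions(designs, patterns):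
--     counts = {}
--     maxlen = 0
--     for p in patterns:
--         counts[p] = counts.get(p, 0) + 1
--         if len(p) > maxlen:
--             maxlen = len(p)
--     def ways(design):
--         n = len(design)
--         dp = [1]
--         for i in range(1, n + 1):
--             total = 0
--             for L in range(0, min(maxlen, i) + 1):
--                 c = counts.get(design[i - L:i], 0)
--                 total += c * (1 if L == 0 else dp[i - L])
--             dp.append(total)
--         return dp[n]
--     memo = {}
--     out = []
--     for d in designs:
--         if d not in memo:
--             memo[d] = ways(d)
--         out.append(memo[d])
--     return out
-- ===== Notes on version B (the rewrite author's own statement) =====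
-- stated objective: faster
-- what changed: Replaces the top-down suffix-stripping recursion memoized on prefix strings by a bottom-up positional dp per design, with the inner scan over all patterns replaced by a pattern-count dictionary indexed once: dp[i] sums counts[design[i-L:i]] * dp[i-L] over the few lengths L up to the longest pattern (an empty pattern contributes its count once, matching A's design[:-0]=='' behaviour); repeated designs are answered from a whole-design memo.
import Mathlib
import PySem

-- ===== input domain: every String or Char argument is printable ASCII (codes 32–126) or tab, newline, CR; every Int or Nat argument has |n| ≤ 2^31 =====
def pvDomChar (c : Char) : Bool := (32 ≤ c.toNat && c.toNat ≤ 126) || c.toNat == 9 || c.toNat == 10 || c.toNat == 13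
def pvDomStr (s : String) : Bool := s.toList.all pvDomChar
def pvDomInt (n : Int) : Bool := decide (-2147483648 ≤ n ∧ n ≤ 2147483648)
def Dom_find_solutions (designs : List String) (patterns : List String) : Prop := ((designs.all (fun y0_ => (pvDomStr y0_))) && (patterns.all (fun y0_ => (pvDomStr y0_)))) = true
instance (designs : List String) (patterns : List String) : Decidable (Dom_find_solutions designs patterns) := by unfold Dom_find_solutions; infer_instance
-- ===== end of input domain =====

-- B replaces A's memoized top-down suffix recursion by a per-design bottom-up dp driven by a pattern-count dictionary (measured faster in a timing run); same values.

-- ===== PORT A =====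
-- calc_solutions with the shared cache threaded through; fuel = len(design)+1 bounds the
-- recursion depth (each recursive call strictly shortens the string), so it never runs out.
def calcA (patterns : List String) : Nat → String → PySem.Dict String Int → Int × PySem.Dict String Int
  | 0, _, cache => (0, cache)
  | fuel+1, design, cache =>
    if design = "" then (1, cache)
    else
      patterns.foldl (fun acc pattern =>
        if PySem.Str.endswith design pattern = true then
          let remainder := PySem.Str.slice design none (some (-(PySem.Str.len pattern : Int)))
          match PySem.Dict.get? acc.2 remainder with
          | some result => (acc.1 + result, acc.2)
          | none =>
            let r := calcA patterns fuel remainder acc.2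
            (acc.1 + r.1, PySem.Dict.insert r.2 remainder r.1)
        else acc) (0, cache)

def find_solutions (designs : List String) (patterns : List String) : List Int :=
  (designs.foldl (fun acc design =>
      let r := calcA patterns ((PySem.Str.len design).toNat + 1) design acc.2
      (acc.1 ++ [r.1], r.2)) (([] : List Int), (PySem.Dict.empty : PySem.Dict String Int))).1

-- ===== PORT B =====
def waysB (counts : PySem.Dict String Int) (maxlen : Int) (design : String) : Int :=
  let n := PySem.Str.len design
  let dp : List Int :=
    (PySem.List.pyRange 1 (n + 1) 1).foldl (fun dp i =>
      let total : Int :=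
        (PySem.List.pyRange 0 (min maxlen i + 1) 1).foldl (fun total L =>
          let c := PySem.Dict.getD counts (PySem.Str.slice design (some (i - L)) (some i)) 0
          total + c * (if L = 0 then 1 else PySem.List.pyGetD dp (i - L) 0)) 0
      dp ++ [total]) [(1 : Int)]
  PySem.List.pyGetD dp n 0

def find_solutions_alt (designs : List String) (patterns : List String) : List Int :=
  let counts := patterns.foldl (fun d p => PySem.Dict.insert d p (PySem.Dict.getD d p 0 + 1)) (PySem.Dict.empty : PySem.Dict String Int)
  let maxlen := patterns.foldl (fun m p => if m < PySem.Str.len p then PySem.Str.len p else m) (0 : Int)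
  (designs.foldl (fun acc d =>
      match PySem.Dict.get? acc.2 d with
      | some v => (acc.1 ++ [v], acc.2)
      | none => (acc.1 ++ [waysB counts maxlen d], PySem.Dict.insert acc.2 d (waysB counts maxlen d)))
    (([] : List Int), (PySem.Dict.empty : PySem.Dict String Int))).1

-- ===== PRECONDITION & SPEC =====
def Spec_find_solutions (designs : List String) (patterns : List String) (out : List Int) : Prop := out = find_solutions_alt designs patterns
instance (designs : List String) (patterns : List String) (out : List Int) : Decidable (Spec_find_solutions designs patterns out) := by unfold Spec_find_solutions; infer_instance

-- ===== CLAIM (what is proved, stated in full; the proofs are below) =====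
def Claim_equal_find_solutions : Prop := ∀ (designs : List String) (patterns : List String), Dom_find_solutions designs patterns → Spec_find_solutions designs patterns (find_solutions designs patterns)

-- ===== LEMMAS AND PROOFS =====

-- the prefix left after stripping pattern p from the end (Python design[:-len(p)]; '' for p = '')
def stripQ (p d : List Char) : List Char :=
  if p.length = 0 then [] else d.take (d.length - p.length)

theorem stripQ_length_lt (p d : List Char) (hd : d ≠ []) : (stripQ p d).length < d.length := by
  unfold stripQ
  have h0 : 0 < d.length := List.length_pos_iff.mpr hd
  split
  · simpa using h0
  · rename_i h
    simp only [List.length_take]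
    omega

-- the reference count: number of ways to tile d from patterns (with A's empty-pattern rule)
def cnt (patterns : List String) (d : List Char) : Int :=
  if d = [] then 1
  else (patterns.map (fun p =>
        if PySem.Chars.endswith d p.toList then cnt patterns (stripQ p.toList d) else 0)).sum
termination_by d.length
decreasing_by exact stripQ_length_lt _ _ (by assumption)

def Good (patterns : List String) (c : PySem.Dict String Int) : Prop :=
  ∀ k v, c.get? k = some v → v = cnt patterns k.toList

theorem good_empty (patterns : List String) : Good patterns PySem.Dict.empty := by
  intro k v h
  simp [PySem.Dict.get?_empty] at h

theorem cnt_nil (patterns : List String) : cnt patterns [] = 1 := by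
  rw [cnt]; simp

theorem cnt_cons (patterns : List String) (d : List Char) (hd : d ≠ []) :
    cnt patterns d = (patterns.map (fun p =>
      if PySem.Chars.endswith d p.toList then cnt patterns (stripQ p.toList d) else 0)).sum := by
  rw [cnt]; simp [hd]

theorem remainder_toList (d p : String) :
    (PySem.Str.slice d none (some (-(PySem.Str.len p : Int)))).toList = stripQ p.toList d.toList := by
  have hb : (PySem.Str.slice d none (some (-(PySem.Str.len p : Int)))).toList
      = PySem.List.slice d.toList none (some (-(PySem.Str.len p : Int))) := by
    simp [pysem]
  rw [hb]
  unfold stripQ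
  have hlen : (PySem.Str.len p : Int) = (p.toList.length : Int) := by
    simp [pysem, PySem.Str.len]
  rcases hn : p.toList.length with _ | k
  · rw [hlen, hn]
    simp [PySem.List.slice_to]
  · rw [hlen, hn]
    rw [PySem.List.slice_to_neg_natCast d.toList (k+1) (by omega)]
    simp

theorem calcA_spec (patterns : List String) :
    ∀ fuel (d : String) c, d.toList.length < fuel → Good patterns c →
      (calcA patterns fuel d c).1 = cnt patterns d.toList ∧ Good patterns (calcA patterns fuel d c).2 := by
  intro fuel
  induction fuel with
  | zero => intro d c h _; exact absurd h (by omega)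
  | succ fuel IH =>
    intro d c hlen hc
    by_cases hd : d = ""
    · subst hd
      simp [calcA, cnt_nil, hc]
    · have hdl : d.toList ≠ [] := by
        intro h
        exact hd (String.toList_inj.mp (by simpa using h))
      have inner : ∀ (ps : List String) (t : Int) (c : PySem.Dict String Int), Good patterns c →
          ((ps.foldl (fun acc pattern =>
            if PySem.Str.endswith d pattern = true then
              match PySem.Dict.get? acc.2 (PySem.Str.slice d none (some (-(PySem.Str.len pattern : Int)))) with
              | some result => (acc.1 + result, acc.2)
              | none =>
                (acc.1 + (calcA patterns fuel (PySem.Str.slice d none (some (-(PySem.Str.len pattern : Int)))) acc.2).1,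
                 PySem.Dict.insert (calcA patterns fuel (PySem.Str.slice d none (some (-(PySem.Str.len pattern : Int)))) acc.2).2 (PySem.Str.slice d none (some (-(PySem.Str.len pattern : Int)))) (calcA patterns fuel (PySem.Str.slice d none (some (-(PySem.Str.len pattern : Int)))) acc.2).1)
            else acc) (t, c)).1
            = t + (ps.map (fun p =>
                if PySem.Chars.endswith d.toList p.toList then cnt patterns (stripQ p.toList d.toList) else 0)).sum
          ∧ Good patterns ((ps.foldl (fun acc pattern =>
            if PySem.Str.endswith d pattern = true then
              match PySem.Dict.get? acc.2 (PySem.Str.slice d none (some (-(PySem.Str.len pattern : Int)))) with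
              | some result => (acc.1 + result, acc.2)
              | none =>
                (acc.1 + (calcA patterns fuel (PySem.Str.slice d none (some (-(PySem.Str.len pattern : Int)))) acc.2).1,
                 PySem.Dict.insert (calcA patterns fuel (PySem.Str.slice d none (some (-(PySem.Str.len pattern : Int)))) acc.2).2 (PySem.Str.slice d none (some (-(PySem.Str.len pattern : Int)))) (calcA patterns fuel (PySem.Str.slice d none (some (-(PySem.Str.len pattern : Int)))) acc.2).1)
            else acc) (t, c)).2)) := by
        intro ps
        induction ps with
        | nil => intro t c hc; simp [hc]
        | cons p ps ihp =>
          intro t c hc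
          by_cases hE : PySem.Str.endswith d p = true
          · have hEc : PySem.Chars.endswith d.toList p.toList = true := by
              simpa [PySem.Str.endswith] using hE
            have hremL : (PySem.Str.slice d none (some (-(PySem.Str.len p : Int)))).toList = stripQ p.toList d.toList := remainder_toList d p
            cases hget : PySem.Dict.get? c (PySem.Str.slice d none (some (-(PySem.Str.len p : Int)))) with
            | some result =>
              have hres : result = cnt patterns (stripQ p.toList d.toList) := by
                have := hc _ result hget
                rwa [hremL] at this
              have step := ihp (t + result) c hc
              simp only [List.foldl_cons, hE, reduceIte, List.map_cons, List.sum_cons, hget]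
              constructor
              · rw [step.1, hres]; simp [hEc]; ring
              · exact step.2
            | none =>
              have hlt : (PySem.Str.slice d none (some (-(PySem.Str.len p : Int)))).toList.length < fuel := by
                rw [hremL]
                have := stripQ_length_lt p.toList d.toList hdl
                omega
              obtain ⟨hr1, hr2⟩ := IH (PySem.Str.slice d none (some (-(PySem.Str.len p : Int)))) c hlt hc
              have hgood : Good patterns (PySem.Dict.insert (calcA patterns fuel (PySem.Str.slice d none (some (-(PySem.Str.len p : Int)))) c).2 (PySem.Str.slice d none (some (-(PySem.Str.len p : Int)))) (calcA patterns fuel (PySem.Str.slice d none (some (-(PySem.Str.len p : Int)))) c).1) := by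
                intro k v hkv
                rw [PySem.Dict.get?_insert] at hkv
                by_cases hk : k = PySem.Str.slice d none (some (-(PySem.Str.len p : Int)))
                · subst hk
                  rw [if_pos rfl] at hkv
                  rw [← Option.some.inj hkv, hr1]
                · rw [if_neg hk] at hkv
                  exact hr2 k v hkv
              have step := ihp (t + (calcA patterns fuel (PySem.Str.slice d none (some (-(PySem.Str.len p : Int)))) c).1)
                (PySem.Dict.insert (calcA patterns fuel (PySem.Str.slice d none (some (-(PySem.Str.len p : Int)))) c).2 (PySem.Str.slice d none (some (-(PySem.Str.len p : Int)))) (calcA patterns fuel (PySem.Str.slice d none (some (-(PySem.Str.len p : Int)))) c).1) hgood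
              simp only [List.foldl_cons, hE, reduceIte, List.map_cons, List.sum_cons, hget]
              constructor
              · rw [step.1, hr1, hremL]; simp [hEc]; ring
              · exact step.2
          · have hEc : PySem.Chars.endswith d.toList p.toList = false := by
              rw [Bool.eq_false_iff]
              intro h
              exact hE (by simpa [PySem.Str.endswith] using h)
            have step := ihp t c hc
            simp only [Bool.not_eq_true] at *
            simp only [List.foldl_cons, hE, Bool.false_eq_true, reduceIte, List.map_cons, List.sum_cons]
            constructor
            · rw [step.1]; simp [hEc]
            · exact step.2
      rw [cnt_cons patterns d.toList hdl]
      have := inner patterns 0 c hc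
      simp only [calcA, if_neg hd]
      constructor
      · rw [this.1]; ring
      · exact this.2

theorem dlen_int (d : String) : PySem.Str.len d = (d.toList.length : Int) := by
  simp [PySem.Str.len, pysem]

theorem endswith_take_iff (dl p : List Char) (m : Nat) (hm : m ≤ dl.length) (_hp : p ≠ []) :
    PySem.Chars.endswith (dl.take m) p = true ↔
      (p.length ≤ m ∧ List.take p.length (List.drop (m - p.length) dl) = p) := by
  rw [PySem.Chars.endswith_iff]
  have hlen : (dl.take m).length = m := by simp [List.length_take]; omega
  constructor
  · intro h
    have hle : p.length ≤ m := by
      have := h.length_le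
      omega
    refine ⟨hle, ?_⟩
    have h2 := List.suffix_iff_eq_drop.mp h
    rw [hlen, List.drop_take, show m - (m - p.length) = p.length by omega] at h2
    exact h2.symm
  · rintro ⟨hle, hEq⟩
    rw [List.suffix_iff_eq_drop, hlen]
    rw [List.drop_take]
    rw [show m - (m - p.length) = p.length by omega]
    exact hEq.symm

theorem stripQ_take (dl p : List Char) (m : Nat) (hm : m ≤ dl.length) (hle : p.length ≤ m) (hp : p ≠ []) :
    stripQ p (dl.take m) = dl.take (m - p.length) := by
  unfold stripQ
  rw [if_neg (by simpa using hp)]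
  have hlen : (dl.take m).length = m := by simp [List.length_take]; omega
  rw [hlen, List.take_take]
  congr 1
  omega

theorem sum_swap_list (l : List String) (r : List Nat) (h : String → Nat → Int) :
    (l.map (fun p => (r.map (h p)).sum)).sum = (r.map (fun L => (l.map (fun p => h p L)).sum)).sum := by
  induction l with
  | nil => simp
  | cons p l ihl =>
    simp only [List.map_cons, List.sum_cons, ihl, ← PySem.List.sum_map_add_int]

theorem sum_indicator_count (l : List String) (s : String) (v : Int) :
    (l.map (fun p => if p = s then v else 0)).sum = (l.count s : Int) * v := by
  induction l with
  | nil => simp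
  | cons p l ihl =>
    simp only [List.map_cons, List.sum_cons, ihl, List.count_cons]
    by_cases hp : p = s
    · subst hp; simp; ring
    · rw [if_neg hp]
      simp [beq_iff_eq, hp]

theorem maxlen_init_le (l : List String) : ∀ m : Int,
    m ≤ l.foldl (fun m p => if m < PySem.Str.len p then PySem.Str.len p else m) m := by
  induction l with
  | nil => intro m; simp
  | cons p l ihl =>
    intro m
    refine le_trans ?_ (ihl _)
    show m ≤ if m < PySem.Str.len p then PySem.Str.len p else m
    split <;> omega

theorem maxlen_mem_le (l : List String) : ∀ (m : Int) (p : String), p ∈ l →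
    PySem.Str.len p ≤ l.foldl (fun m p => if m < PySem.Str.len p then PySem.Str.len p else m) m := by
  induction l with
  | nil => intro m p hp; simp at hp
  | cons q l ihl =>
    intro m p hp
    rcases List.mem_cons.mp hp with h | h
    · subst h
      simp only [List.foldl_cons]
      refine le_trans ?_ (maxlen_init_le l _)
      show PySem.Str.len p ≤ if m < PySem.Str.len p then PySem.Str.len p else m
      split <;> omega
    · exact ihl _ p h

theorem sL_toList (d : String) (m L : Nat) (hL : L ≤ m) :
    (PySem.Str.slice d (some ((m : Int) - (L : Int))) (some (m : Int))).toList
      = List.take L (List.drop (m - L) d.toList) := by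
  have hcast : ((m : Int) - (L : Int)) = ((m - L : Nat) : Int) := by omega
  rw [hcast]
  have hb : (PySem.Str.slice d (some ((m - L : Nat) : Int)) (some (m : Int))).toList
      = PySem.List.slice d.toList (some ((m - L : Nat) : Int)) (some (m : Int)) := by
    simp [pysem]
  rw [hb, PySem.List.slice_natCast]
  rw [show m - (m - L) = L by omega]

theorem sL_length (d : String) (m L : Nat) (hL : L ≤ m) (hm : m ≤ d.toList.length) :
    (PySem.Str.slice d (some ((m : Int) - (L : Int))) (some (m : Int))).toList.length = L := by
  rw [sL_toList d m L hL]
  rw [List.length_take, List.length_drop]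
  omega

theorem sL_suffix (d : String) (m L : Nat) (hL : L ≤ m) :
    (PySem.Str.slice d (some ((m : Int) - (L : Int))) (some (m : Int))).toList <:+ d.toList.take m := by
  rw [sL_toList d m L hL]
  rw [show List.take L (List.drop (m - L) d.toList)
      = List.drop (m - L) (List.take m d.toList) by
    rw [List.drop_take, show m - (m - L) = L by omega]]
  exact List.drop_suffix _ _

theorem sum_delta_range (n j : Nat) (hj : j < n) (v : Nat → Int) :
    ((List.range n).map (fun L => if L = j then v L else 0)).sum = v j := by
  have hb : ((List.range n).map (fun L => if L = j then v L else 0)).sum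
      = ∑ L ∈ Finset.range n, (if L = j then v L else 0) := rfl
  rw [hb, Finset.sum_ite_eq' (Finset.range n) j v]
  simp [Finset.mem_range, hj]

theorem waysB_eq_cnt (patterns : List String) (counts : PySem.Dict String Int) (maxlen : Int)
    (hc : ∀ s : String, PySem.Dict.getD counts s 0 = (patterns.count s : Int))
    (hm0 : 0 ≤ maxlen)
    (hml : ∀ p ∈ patterns, PySem.Str.len p ≤ maxlen)
    (d : String) :
    waysB counts maxlen d = cnt patterns d.toList := by
  have hterm : ∀ (p : String), p ∈ patterns → ∀ (m K : Nat), 1 ≤ m → m ≤ d.toList.length →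
      (K : Int) = min maxlen ((m : Nat) : Int) →
      (if PySem.Chars.endswith (d.toList.take m) p.toList then cnt patterns (stripQ p.toList (d.toList.take m)) else 0)
      = ((List.range (K+1)).map (fun (L : Nat) =>
          if p = PySem.Str.slice d (some ((m : Int) - (L : Int))) (some (m : Int)) then
            (if L = 0 then (1 : Int) else cnt patterns (d.toList.take (m - L)))
          else 0)).sum := by
    intro p hp m K hm1 hmN hK
    have hKm : K ≤ m := by
      have h := min_le_right maxlen ((m : Nat) : Int)
      omega
    by_cases hE : PySem.Chars.endswith (d.toList.take m) p.toList = true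
    · have hpnil_or : p.toList.length ≤ m ∧ List.take p.toList.length (List.drop (m - p.toList.length) d.toList) = p.toList := by
        by_cases hpn : p.toList = []
        · constructor
          · simp [hpn]
          · simp [hpn]
        · exact (endswith_take_iff d.toList p.toList m hmN hpn).mp hE
      obtain ⟨hlpm, heq⟩ := hpnil_or
      have hpeq : p = PySem.Str.slice d (some ((m : Int) - (p.toList.length : Int))) (some (m : Int)) := by
        rw [← String.toList_inj, sL_toList d m p.toList.length hlpm, heq]
      have hlpK : p.toList.length ≤ K := by
        have h0 := hml p hp
        rw [dlen_int p] at h0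
        omega
      have hpt : ∀ (L : Nat), L ∈ List.range (K+1) →
          (if p = PySem.Str.slice d (some ((m : Int) - (L : Int))) (some (m : Int)) then
            (if L = 0 then (1 : Int) else cnt patterns (d.toList.take (m - L)))
          else 0)
          = (if L = p.toList.length then
              (if L = 0 then (1 : Int) else cnt patterns (d.toList.take (m - L))) else 0) := by
        intro L hL
        have hLK : L ≤ K := by
          have := List.mem_range.mp hL
          omega
        by_cases hLlp : L = p.toList.length
        · subst hLlp
          rw [if_pos hpeq, if_pos rfl]
        · rw [if_neg ?_, if_neg hLlp]
          intro hcon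
          apply hLlp
          have hlen2 := congrArg (fun s => s.toList.length) hcon
          simp only [] at hlen2
          rw [sL_length d m L (by omega) hmN] at hlen2
          exact hlen2.symm
      rw [List.map_congr_left hpt,
        sum_delta_range (K+1) p.toList.length (by omega)
          (fun L => if L = 0 then (1 : Int) else cnt patterns (d.toList.take (m - L)))]
      rw [if_pos hE]
      by_cases hp0 : p.toList.length = 0
      · rw [if_pos hp0]
        have hpn : p.toList = [] := List.length_eq_zero_iff.mp hp0
        unfold stripQ
        rw [if_pos (by simp [hpn]), cnt_nil]
      · rw [if_neg hp0]
        rw [stripQ_take d.toList p.toList m hmN hlpm (fun h => hp0 (by simp [h]))]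
    · have hpt : ∀ L ∈ List.range (K+1),
          (if p = PySem.Str.slice d (some ((m : Int) - (L : Int))) (some (m : Int)) then
            (if L = 0 then (1 : Int) else cnt patterns (d.toList.take (m - L)))
          else 0)
          = (0 : Int) := by
        intro L hL
        have hLK : L ≤ K := by
          have := List.mem_range.mp hL
          omega
        rw [if_neg ?_]
        intro hcon
        apply hE
        rw [PySem.Chars.endswith_iff, hcon]
        exact sL_suffix d m L (by omega)
      rw [List.map_congr_left hpt]
      rw [Bool.not_eq_true] at hE
      rw [if_neg (by simp [hE])]
      simp
  have hpos : ∀ (m K : Nat), 1 ≤ m → m ≤ d.toList.length →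
      (K : Int) = min maxlen ((m : Nat) : Int) →
      ((List.range (K+1)).map (fun (L : Nat) =>
        PySem.Dict.getD counts (PySem.Str.slice d (some ((m : Int) - (L : Int))) (some (m : Int))) 0 *
          (if ((L : Nat) : Int) = 0 then 1
           else PySem.List.pyGetD ((List.range m).map (fun j => cnt patterns (d.toList.take j))) ((m : Int) - (L : Int)) 0))).sum
      = cnt patterns (d.toList.take m) := by
    intro m K hm1 hmN hK
    have hne : d.toList.take m ≠ [] := by
      have h : 0 < (d.toList.take m).length := by
        rw [List.length_take]
        omega
      exact List.length_pos_iff.mp h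
    rw [cnt_cons patterns (d.toList.take m) hne]
    rw [List.map_congr_left (fun p hp => hterm p hp m K hm1 hmN hK)]
    rw [sum_swap_list patterns (List.range (K+1))
      (fun p L => if p = PySem.Str.slice d (some ((m : Int) - (L : Int))) (some (m : Int)) then
            (if L = 0 then (1 : Int) else cnt patterns (d.toList.take (m - L))) else 0)]
    have hfin : ∀ (L : Nat), L ∈ List.range (K+1) →
        (PySem.Dict.getD counts (PySem.Str.slice d (some ((m : Int) - (L : Int))) (some (m : Int))) 0 *
          (if ((L : Nat) : Int) = 0 then 1
           else PySem.List.pyGetD ((List.range m).map (fun j => cnt patterns (d.toList.take j))) ((m : Int) - (L : Int)) 0))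
        = (patterns.map (fun p =>
            if p = PySem.Str.slice d (some ((m : Int) - (L : Int))) (some (m : Int)) then
              (if L = 0 then (1 : Int) else cnt patterns (d.toList.take (m - L))) else 0)).sum := by
      intro L hL
      have hLK : L ≤ K := by
        have := List.mem_range.mp hL
        omega
      have hKm : K ≤ m := by
        have h := min_le_right maxlen ((m : Nat) : Int)
        omega
      rw [sum_indicator_count patterns
        (PySem.Str.slice d (some ((m : Int) - (L : Int))) (some (m : Int)))
        (if L = 0 then (1 : Int) else cnt patterns (d.toList.take (m - L)))]
      rw [hc]
      by_cases hL0 : L = 0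
      · subst hL0
        simp
      · rw [if_neg (by exact_mod_cast hL0), if_neg hL0]
        rw [show (m : Int) - (L : Int) = ((m - L : Nat) : Int) by omega]
        rw [PySem.List.pyGetD_natCast]
        rw [PySem.List.getD_map_range _ _ _ _ (by omega)]
    rw [List.map_congr_left hfin]
  have hN := dlen_int d
  have main : ∀ i : Nat, i ≤ d.toList.length →
      ((PySem.List.pyRange 1 ((i : Int) + 1) 1).foldl
        (fun dp I =>
          dp ++ [(PySem.List.pyRange 0 (min maxlen I + 1) 1).foldl (fun total L =>
            total + PySem.Dict.getD counts (PySem.Str.slice d (some (I - L)) (some I)) 0 *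
              (if L = 0 then 1 else PySem.List.pyGetD dp (I - L) 0)) 0]) [(1 : Int)])
      = (List.range (i+1)).map (fun j => cnt patterns (d.toList.take j)) := by
    intro i
    induction i with
    | zero =>
      intro _
      norm_num
      simp [cnt_nil]
    | succ i ihi =>
      intro hi
      have hcast : ((i + 1 : Nat) : Int) + 1 = ((i : Int) + 1) + 1 := by push_cast; ring
      rw [hcast, PySem.List.pyRange_one_succ_right (by omega), List.foldl_append, ihi (by omega)]
      simp only [List.foldl_cons, List.foldl_nil]
      have hcast2 : ((i : Int) + 1) = ((i + 1 : Nat) : Int) := by push_cast; ring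
      rw [hcast2]
      rw [PySem.List.foldl_add]
      have hKint : (((min maxlen ((i+1 : Nat) : Int)).toNat : Nat) : Int) = min maxlen ((i+1 : Nat) : Int) :=
        Int.toNat_of_nonneg (le_min hm0 (by positivity))
      rw [show min maxlen ((i+1 : Nat) : Int) + 1 = (((min maxlen ((i+1 : Nat) : Int)).toNat + 1 : Nat) : Int) by
        push_cast
        omega]
      rw [PySem.List.pyRange_zero_natCast ((min maxlen ((i+1 : Nat) : Int)).toNat + 1)]
      rw [List.map_map]
      simp only [Function.comp_def]
      rw [hpos (i+1) (min maxlen ((i+1 : Nat) : Int)).toNat (by omega) hi hKint]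
      simp [List.range_succ]
  have hmain := main d.toList.length le_rfl
  simp only [waysB, hN]
  rw [hmain, PySem.List.pyGetD_natCast,
    PySem.List.getD_map_range _ _ _ _ (by omega), List.take_length]

theorem altB_eq_map (patterns : List String) (counts : PySem.Dict String Int) (maxlen : Int)
    (hc : ∀ s : String, PySem.Dict.getD counts s 0 = (patterns.count s : Int))
    (hm0 : 0 ≤ maxlen)
    (hml : ∀ p ∈ patterns, PySem.Str.len p ≤ maxlen) :
    ∀ (designs : List String) (out : List Int) (m : PySem.Dict String Int), Good patterns m →
      (designs.foldl (fun acc d =>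
        match PySem.Dict.get? acc.2 d with
        | some v => (acc.1 ++ [v], acc.2)
        | none => (acc.1 ++ [waysB counts maxlen d], PySem.Dict.insert acc.2 d (waysB counts maxlen d)))
        (out, m)).1 = out ++ designs.map (fun d => cnt patterns d.toList) := by
  intro designs
  induction designs with
  | nil => intro out m _; simp
  | cons d ds ih =>
    intro out m hm
    simp only [List.foldl_cons, List.map_cons]
    cases hget : PySem.Dict.get? m d with
    | some v =>
      have hv : v = cnt patterns d.toList := hm d v hget
      rw [ih (out ++ [v]) m hm]
      simp [hv]
    | none =>
      have hm' : Good patterns (PySem.Dict.insert m d (waysB counts maxlen d)) := by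
        intro k v hkv
        rw [PySem.Dict.get?_insert] at hkv
        by_cases hk : k = d
        · subst hk
          rw [if_pos rfl] at hkv
          rw [← Option.some.inj hkv, waysB_eq_cnt patterns counts maxlen hc hm0 hml]
        · rw [if_neg hk] at hkv
          exact hm k v hkv
      rw [ih (out ++ [waysB counts maxlen d]) (PySem.Dict.insert m d (waysB counts maxlen d)) hm']
      simp [waysB_eq_cnt patterns counts maxlen hc hm0 hml]

-- ===== VERDICT (by name: the statement is the Claim_ definition above) =====
theorem find_solutions_spec : Claim_equal_find_solutions := by
  intro designs patterns hdom
  clear hdom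
  unfold Spec_find_solutions find_solutions find_solutions_alt
  have hc : ∀ s : String,
      PySem.Dict.getD (patterns.foldl (fun d p => PySem.Dict.insert d p (PySem.Dict.getD d p 0 + 1)) (PySem.Dict.empty : PySem.Dict String Int)) s 0
        = (patterns.count s : Int) := by
    intro s
    rw [PySem.Dict.getD_foldl_insert_add_one]
    simp [PySem.Dict.getD_empty]
  have hm0 : (0 : Int) ≤ patterns.foldl (fun m p => if m < PySem.Str.len p then PySem.Str.len p else m) 0 :=
    maxlen_init_le patterns 0
  have hml : ∀ p ∈ patterns, PySem.Str.len p ≤ patterns.foldl (fun m p => if m < PySem.Str.len p then PySem.Str.len p else m) 0 :=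
    fun p hp => maxlen_mem_le patterns 0 p hp
  rw [altB_eq_map patterns _ _ hc hm0 hml designs [] PySem.Dict.empty (good_empty patterns)]
  suffices h : ∀ (out : List Int) (c : PySem.Dict String Int), Good patterns c →
      (designs.foldl (fun acc design =>
        let r := calcA patterns ((PySem.Str.len design).toNat + 1) design acc.2
        (acc.1 ++ [r.1], r.2)) (out, c)).1 = out ++ designs.map (fun d => cnt patterns d.toList) by
    simpa using h [] PySem.Dict.empty (good_empty patterns)
  induction designs with
  | nil => intro out c _; simp
  | cons d ds ih =>
    intro out c hc'
    have hlen : d.toList.length < (PySem.Str.len d).toNat + 1 := by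
      simp [PySem.Str.len]
    obtain ⟨h1, h2⟩ := calcA_spec patterns ((PySem.Str.len d).toNat + 1) d c hlen hc'
    simp only [List.foldl_cons, List.map_cons]
    have key := ih (out ++ [(calcA patterns ((PySem.Str.len d).toNat + 1) d c).1])
      ((calcA patterns ((PySem.Str.len d).toNat + 1) d c).2) h2
    simpa [← h1] using key
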